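-- pv_equiv track=rewrite | github.com/zeunala/ProblemSolving | Programmers/2021.10-2021.12/Lv2_17683.py | getMusic
-- ===== SOURCE A (Python) =====
-- def getMusic(defaultMusic, length): # 악보 문자열 반환
--     idx = 0
--     result = ""
--     remainLength = length
--
--     while remainLength > 0:
--         current = defaultMusic[idx]
--
--         if idx + 1 < len(defaultMusic) and defaultMusic[idx + 1] == "#":
--             current += defaultMusic[idx + 1]
--             idx += 2
--         else:
--             current += "0"
--             idx += 1
--
--         result += current
--         remainLength -= 1
--
--         if idx >= len(defaultMusic):
--             idx = 0
--
--     return result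
-- ===== SOURCE B (Python) =====
-- def getMusic(defaultMusic, length):
--     # Phase 1: parse the score once into whole notes ("C#" or "C0").
--     notes = []
--     s = defaultMusic
--     while s:
--         if s[1:2] == '#':
--             notes.append(s[:2])
--             s = s[2:]
--         else:
--             notes.append(s[0] + '0')
--             s = s[1:]
--     # Phase 2: emit `length` notes cyclically by modular indexing.
--     return ''.join(notes[k % len(notes)] for k in range(length))
-- ===== Notes on version B (the rewrite author's own statement) =====
-- stated objective: simpler
-- what changed: B parses the score once into a list of whole notes and then emits the output in a separate pass by modular indexing over range(length), instead of A's single loop that re-parses while wrapping a running index.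
import Mathlib
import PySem

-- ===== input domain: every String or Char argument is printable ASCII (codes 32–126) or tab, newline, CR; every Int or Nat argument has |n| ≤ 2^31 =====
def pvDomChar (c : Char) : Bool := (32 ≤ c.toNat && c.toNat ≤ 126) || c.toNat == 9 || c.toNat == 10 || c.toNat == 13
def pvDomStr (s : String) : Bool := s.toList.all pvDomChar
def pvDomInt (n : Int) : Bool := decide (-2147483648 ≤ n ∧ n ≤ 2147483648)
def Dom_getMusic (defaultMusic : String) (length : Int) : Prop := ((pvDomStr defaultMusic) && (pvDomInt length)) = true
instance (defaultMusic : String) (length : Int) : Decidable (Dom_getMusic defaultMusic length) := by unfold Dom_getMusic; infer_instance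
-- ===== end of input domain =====

-- B parses the score once into a list of whole notes, then emits `length` notes by modular
-- indexing; objective: simpler (two plain phases instead of one wrapping-index loop).


-- ===== PORT A =====
-- The while loop runs exactly max(length,0) times (remainLength decreases by 1 each pass),
-- so it is ported as structural recursion on fuel = length.toNat.  Python's idx is always a
-- nonnegative in-range index under Pre_, so `defaultMusic[idx]` is ported as `cs.getD idx ' '`
-- (the default is never read on inputs admitted by Pre_; on excluded inputs Python raises IndexError).
def getMusicGo (cs : List Char) (fuel : Nat) (idx : Nat) (result : List Char) : List Char :=
  match fuel with
  | 0 => result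
  | n + 1 =>
    if idx + 1 < cs.length ∧ cs.getD (idx + 1) ' ' = '#' then
      -- current = defaultMusic[idx] + defaultMusic[idx+1]; idx += 2; result += current; wrap
      getMusicGo cs n (if idx + 2 ≥ cs.length then 0 else idx + 2)
        (result ++ [cs.getD idx ' ', cs.getD (idx + 1) ' '])
    else
      -- current = defaultMusic[idx] + "0"; idx += 1; result += current; wrap
      getMusicGo cs n (if idx + 1 ≥ cs.length then 0 else idx + 1)
        (result ++ [cs.getD idx ' ', '0'])

def getMusic (defaultMusic : String) (length : Int) : String :=
  String.ofList (getMusicGo defaultMusic.toList length.toNat 0 [])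

-- ===== PORT B =====
-- Phase 1 of Source B: the while loop consumes the string from the front (s = s[1:]/s[2:]),
-- ported as structural recursion on the character list.
def notesOf : List Char → List (List Char)
  | [] => []
  | c :: '#' :: rest' => [c, '#'] :: notesOf rest'   -- s[1:2] == '#': append s[:2]
  | c :: rest => [c, '0'] :: notesOf rest            -- append s[0] + '0'

-- Phase 2 of Source B: ''.join(notes[k % len(notes)] for k in range(length)).
def getMusic_alt (defaultMusic : String) (length : Int) : String :=
  let notes := notesOf defaultMusic.toList
  String.ofList ((List.range length.toNat).flatMap fun k => notes.getD (k % notes.length) [])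

-- ===== PRECONDITION & SPEC =====
-- Pre_ excludes only the empty score with positive length, where A raises IndexError (and B
-- raises ZeroDivisionError).
def Pre_getMusic (defaultMusic : String) (length : Int) : Prop :=
  defaultMusic = "" → length ≤ 0
instance (defaultMusic : String) (length : Int) : Decidable (Pre_getMusic defaultMusic length) := by
  unfold Pre_getMusic; infer_instance

def pvWitness_getMusic : String × Int := ("CC#BCC#BC", 8)

def Spec_getMusic (defaultMusic : String) (length : Int) (out : String) : Prop := out = getMusic_alt defaultMusic length
instance (defaultMusic : String) (length : Int) (out : String) : Decidable (Spec_getMusic defaultMusic length out) := by unfold Spec_getMusic; infer_instance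

-- ===== CLAIM (what is proved, stated in full; the proofs are below) =====
def Claim_equal_getMusic : Prop := ∀ (defaultMusic : String) (length : Int), Dom_getMusic defaultMusic length → Pre_getMusic defaultMusic length → Spec_getMusic defaultMusic length (getMusic defaultMusic length)

-- ===== LEMMAS AND PROOFS =====

-- Common reference: emit n notes, reading from the remaining list N and restarting from `full`
-- when N is exhausted.
def emitCyc (full : List (List Char)) (N : List (List Char)) (n : Nat) : List Char :=
  match n with
  | 0 => []
  | n + 1 =>
    let N' := if N = [] then full else N
    N'.headD [] ++ emitCyc full N'.tail n

lemma emitCyc_nil (full : List (List Char)) (n : Nat) :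
    emitCyc full [] n = emitCyc full full n := by
  cases n with
  | zero => rfl
  | succ n =>
    simp only [emitCyc]
    by_cases h : full = [] <;> simp [h]

lemma notesOf_ne_nil (c : Char) (rest : List Char) : notesOf (c :: rest) ≠ [] := by
  match rest with
  | [] => simp [notesOf]
  | '#' :: rest' => simp [notesOf]
  | r :: rest' =>
    by_cases h : r = '#' <;> simp_all [notesOf]

lemma getD_drop (cs suf : List Char) (i k : Nat) (d : Char) (h : cs.drop i = suf) :
    cs.getD (i + k) d = suf.getD k d := by
  subst h; simp [List.getD, List.getElem?_drop]

-- A's loop computes emitCyc over the parsed notes: idx is always a note boundary, and the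
-- remaining suffix cs.drop idx parses to the remaining notes.
lemma getMusicGo_emitCyc (fuel : Nat) :
    ∀ (cs : List Char) (idx : Nat) (res : List Char), idx < cs.length →
      getMusicGo cs fuel idx res = res ++ emitCyc (notesOf cs) (notesOf (cs.drop idx)) fuel := by
  induction fuel with
  | zero => intro cs idx res _; simp [getMusicGo, emitCyc]
  | succ n ih =>
    intro cs idx res hidx
    have hsuf : cs.drop idx ≠ [] := by
      intro h; have := List.drop_eq_nil_iff.mp h; omega
    obtain ⟨c, rest, hdrop⟩ : ∃ c rest, cs.drop idx = c :: rest := by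
      cases h : cs.drop idx with
      | nil => exact absurd h hsuf
      | cons c rest => exact ⟨c, rest, rfl⟩
    have hc : cs.getD idx ' ' = c := by
      have := getD_drop cs _ idx 0 ' ' hdrop
      simpa using this
    have hrest : rest = cs.drop (idx + 1) := by
      have := congrArg List.tail hdrop
      simpa [List.tail_drop] using this.symm
    have hlen : rest.length = cs.length - (idx + 1) := by
      rw [hrest]; simp
    have hN : notesOf (cs.drop idx) = notesOf (c :: rest) := by rw [hdrop]
    by_cases hsharp : idx + 1 < cs.length ∧ cs.getD (idx + 1) ' ' = '#'
    · -- sharp note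
      obtain ⟨h1, h2⟩ := hsharp
      obtain ⟨rest', hrest'⟩ : ∃ rest', rest = '#' :: rest' := by
        have hrl : 0 < rest.length := by omega
        cases hr : rest with
        | nil => simp [hr] at hrl
        | cons r rs =>
          have hgr : cs.getD (idx + 1) ' ' = r := by
            have := getD_drop cs _ (idx + 1) 0 ' ' hrest.symm
            simpa [hr] using this
          exact ⟨rs, by rw [← h2, hgr]⟩
      have hrest2 : rest' = cs.drop (idx + 2) := by
        have := congrArg List.tail hrest'
        simp only [List.tail_cons] at this
        rw [hrest, List.tail_drop] at this
        simpa using this.symm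
      have hNsuf : notesOf (cs.drop idx) = [c, '#'] :: notesOf rest' := by
        rw [hN, hrest']; rfl
      have hstep : getMusicGo cs (n + 1) idx res =
          getMusicGo cs n (if idx + 2 ≥ cs.length then 0 else idx + 2) (res ++ [c, '#']) := by
        simp only [getMusicGo]
        rw [if_pos ⟨h1, h2⟩, hc, h2]
      rw [hstep]
      by_cases hend : idx + 2 ≥ cs.length
      · have hdone : cs.drop (idx + 2) = [] := List.drop_eq_nil_of_le hend
        rw [if_pos hend, ih cs 0 _ (by omega), List.drop_zero]
        conv_rhs => rw [hNsuf]
        simp only [emitCyc]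
        rw [if_neg (by simp)]
        simp [hrest2, hdone, notesOf, emitCyc_nil, List.append_assoc]
      · rw [if_neg hend, ih cs (idx + 2) _ (by omega)]
        conv_rhs => rw [hNsuf]
        simp only [emitCyc]
        rw [if_neg (by simp)]
        simp [hrest2, List.append_assoc]
    · -- plain note
      have hNsuf : notesOf (cs.drop idx) = [c, '0'] :: notesOf rest := by
        rw [hN]
        cases hr : rest with
        | nil => rfl
        | cons r rs =>
          have hrne : r ≠ '#' := by
            intro hrr
            apply hsharp
            have hrl : 0 < rest.length := by rw [hr]; simp
            refine ⟨by omega, ?_⟩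
            have hgr : cs.getD (idx + 1) ' ' = r := by
              have := getD_drop cs _ (idx + 1) 0 ' ' hrest.symm
              simpa [hr] using this
            rw [hgr, hrr]
          simp [notesOf, hrne]
      have hstep : getMusicGo cs (n + 1) idx res =
          getMusicGo cs n (if idx + 1 ≥ cs.length then 0 else idx + 1) (res ++ [c, '0']) := by
        simp only [getMusicGo]
        rw [if_neg hsharp, hc]
      rw [hstep]
      by_cases hend : idx + 1 ≥ cs.length
      · have hdone : cs.drop (idx + 1) = [] := List.drop_eq_nil_of_le hend
        rw [if_pos hend, ih cs 0 _ (by omega), List.drop_zero]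
        conv_rhs => rw [hNsuf]
        simp only [emitCyc]
        rw [if_neg (by simp)]
        simp [hrest ▸ hdone, notesOf, emitCyc_nil, List.append_assoc]
      · rw [if_neg hend, ih cs (idx + 1) _ (by omega)]
        conv_rhs => rw [hNsuf]
        simp only [emitCyc]
        rw [if_neg (by simp)]
        simp [hrest, List.append_assoc]

lemma flatMap_range_succ {α : Type} (f : Nat → List α) (n : Nat) :
    (List.range (n + 1)).flatMap f = f 0 ++ (List.range n).flatMap (fun k => f (k + 1)) := by
  rw [List.range_succ_eq_map]
  simp [List.flatMap_cons, List.flatMap_map]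

-- B's modular emission also computes emitCyc.
lemma emitCyc_flatMap (n : Nat) :
    ∀ (N : List (List Char)) (j : Nat), j < N.length →
      emitCyc N (N.drop j) n = (List.range n).flatMap (fun k => N.getD ((j + k) % N.length) []) := by
  induction n with
  | zero => intro N j _; simp [emitCyc]
  | succ n ih =>
    intro N j hjlt
    have hN : N ≠ [] := by intro h; simp [h] at hjlt
    have hdne : N.drop j ≠ [] := by
      intro h; have := List.drop_eq_nil_iff.mp h; omega
    simp only [emitCyc, if_neg hdne]
    have hhead : (N.drop j).headD [] = N.getD j [] := by
      simp [List.head?_drop, List.getD]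
    have htail : (N.drop j).tail = N.drop (j + 1) := by rw [List.tail_drop]
    rw [hhead, htail, flatMap_range_succ]
    congr 1
    · simp [Nat.mod_eq_of_lt hjlt]
    · rcases Nat.lt_or_ge (j + 1) N.length with h1 | h1
      · rw [ih N (j + 1) h1]
        congr 1
        funext k
        congr 2
        omega
      · have h0 := ih N 0 (by omega)
        rw [List.drop_zero] at h0
        rw [List.drop_eq_nil_of_le h1, emitCyc_nil, h0]
        congr 1
        funext k
        have heq : (j + (k + 1)) % N.length = (0 + k) % N.length := by
          rw [Nat.zero_add, show j + (k + 1) = k + N.length by omega, Nat.add_mod_right]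
        rw [heq]

-- ===== VERDICT (by name: the statement is the Claim_ definition above) =====
theorem getMusic_spec : Claim_equal_getMusic := by
  intro s length _ hpre
  unfold Spec_getMusic getMusic getMusic_alt
  cases hcs : s.toList with
  | nil =>
    have hs : s = "" := by
      have := congrArg String.ofList hcs
      simpa using this
    have h0 : length.toNat = 0 := Int.toNat_of_nonpos (hpre hs)
    simp [h0, getMusicGo]
  | cons c rest =>
    have hNne : notesOf (c :: rest) ≠ [] := notesOf_ne_nil c rest
    have hlen : 0 < (c :: rest).length := by simp
    rw [getMusicGo_emitCyc length.toNat (c :: rest) 0 [] hlen, List.drop_zero]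
    have h0 := emitCyc_flatMap length.toNat (notesOf (c :: rest)) 0
      (by cases h : notesOf (c :: rest) with
          | nil => exact absurd h hNne
          | cons a l => simp)
    rw [List.drop_zero] at h0
    rw [h0]
    simp
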